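-- pv_equiv track=rewrite | github.com/ktan16/leetcodePython | 4_test/ibm_assessment1.py | getMaximumProfit
-- ===== SOURCE A (Python) =====
-- def getMaximumProfit(price, profit):
--     # Write your code here
--     maxprofit = -1
--
--     for i in range(len(price)):
--         for j in range(i, len(price)):
--             if price[j] > price[i]:
--                 for k in range(j, len(price)):
--                     currprofit = 0
--                     if price[k] > price[j]:
--                         currprofit = profit[i] + profit[j] + profit[k]
--                         maxprofit = max(currprofit, maxprofit)
--
--     return maxprofit
-- ===== SOURCE B (Python) =====
-- def getMaximumProfit(price, profit):
--     n = len(price)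
--     best = -1
--     for j in range(n):
--         left = None
--         for i in range(j):
--             if price[i] < price[j] and (left is None or profit[i] > left):
--                 left = profit[i]
--         if left is None:
--             continue
--         right = None
--         for k in range(j + 1, n):
--             if price[k] > price[j] and (right is None or profit[k] > right):
--                 right = profit[k]
--         if right is not None:
--             best = max(best, left + profit[j] + right)
--     return best
-- ===== Notes on version B (the rewrite author's own statement) =====
-- stated objective: faster
-- what changed: Replaces the triple nested scan over (i,j,k) by a single pass over the middle index j that computes the best valid left profit (i<j, price[i]<price[j]) and best valid right profit (k>j, price[k]>price[j]) in two linear scans, combining them per j.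
-- outside the precondition, e.g. on getMaximumProfit([1, 2], []): A returns -1, B raises IndexError
import Mathlib
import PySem

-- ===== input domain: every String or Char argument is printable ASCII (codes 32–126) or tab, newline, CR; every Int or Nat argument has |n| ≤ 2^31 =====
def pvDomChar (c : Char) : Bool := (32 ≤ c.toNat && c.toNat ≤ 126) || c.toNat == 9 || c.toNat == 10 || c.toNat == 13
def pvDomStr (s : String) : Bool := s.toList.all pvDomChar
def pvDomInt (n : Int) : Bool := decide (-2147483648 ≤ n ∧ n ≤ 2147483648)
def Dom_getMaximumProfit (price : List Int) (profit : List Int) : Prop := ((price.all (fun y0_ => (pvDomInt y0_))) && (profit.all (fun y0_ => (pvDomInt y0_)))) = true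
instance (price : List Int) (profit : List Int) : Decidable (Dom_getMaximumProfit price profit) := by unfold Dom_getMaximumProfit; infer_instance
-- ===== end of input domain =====

-- B replaces A's triple nested scan by one pass over the middle index j with two linear scans
-- (best left profit with price[i] < price[j], best right profit with price[k] > price[j]); objective: faster.

-- ===== PORT A =====
-- literal transliteration of A's triple loop (the dead 'currprofit = 0' initialisation is elided;
-- it is overwritten before every use that affects the result)
def getMaximumProfit (price : List Int) (profit : List Int) : Int :=
  (PySem.List.pyRange 0 (PySem.List.len price) 1).foldl (fun maxprofit i =>
    (PySem.List.pyRange i (PySem.List.len price) 1).foldl (fun maxprofit j =>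
      if PySem.List.pyGetD price j 0 > PySem.List.pyGetD price i 0 then
        (PySem.List.pyRange j (PySem.List.len price) 1).foldl (fun maxprofit k =>
          if PySem.List.pyGetD price k 0 > PySem.List.pyGetD price j 0 then
            max (PySem.List.pyGetD profit i 0 + PySem.List.pyGetD profit j 0 + PySem.List.pyGetD profit k 0) maxprofit
          else maxprofit) maxprofit
      else maxprofit) maxprofit) (-1)

-- ===== PORT B =====
-- transliteration of Source B: one pass over the middle index j; 'left'/'right' are the Python
-- None-or-best accumulators, rendered as Option Int
def getMaximumProfit_alt (price : List Int) (profit : List Int) : Int :=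
  (PySem.List.pyRange 0 (PySem.List.len price) 1).foldl (fun best j =>
    let left := (PySem.List.pyRange 0 j 1).foldl (fun left i =>
      match left with
      | none => if PySem.List.pyGetD price i 0 < PySem.List.pyGetD price j 0 then
                  some (PySem.List.pyGetD profit i 0) else none
      | some a => if PySem.List.pyGetD price i 0 < PySem.List.pyGetD price j 0 ∧ PySem.List.pyGetD profit i 0 > a then
                  some (PySem.List.pyGetD profit i 0) else some a) none
    match left with
    | none => best
    | some L =>
      let right := (PySem.List.pyRange (j + 1) (PySem.List.len price) 1).foldl (fun right k =>
        match right with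
        | none => if PySem.List.pyGetD price k 0 > PySem.List.pyGetD price j 0 then
                    some (PySem.List.pyGetD profit k 0) else none
        | some a => if PySem.List.pyGetD price k 0 > PySem.List.pyGetD price j 0 ∧ PySem.List.pyGetD profit k 0 > a then
                    some (PySem.List.pyGetD profit k 0) else some a) none
      match right with
      | none => best
      | some R => max best (L + PySem.List.pyGetD profit j 0 + R)) (-1)

-- ===== PRECONDITION & SPEC =====
-- Pre_ excludes the short-profit inputs on which a program raises IndexError: profit must be long
-- enough to cover every position B reads (a position with a later strictly higher price, or one
-- below a higher price that itself has a lower earlier price); A reads a subset of those positions,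
-- so inside Pre_ neither program raises, and outside Pre_ B raises while A may still return -1.
def Pre_getMaximumProfit (price : List Int) (profit : List Int) : Prop :=
  ∀ m < price.length,
    ((∃ j < price.length, m < j ∧ price.getD m 0 < price.getD j 0) ∨
     (∃ j < m, price.getD j 0 < price.getD m 0 ∧ ∃ i < j, price.getD i 0 < price.getD j 0)) →
    m < profit.length
instance (price : List Int) (profit : List Int) : Decidable (Pre_getMaximumProfit price profit) := by
  unfold Pre_getMaximumProfit; infer_instance

def pvWitness_getMaximumProfit : List Int × List Int := ([10, 2, 3, 5, 1], [3, 1, 4, 1, 5])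

def Spec_getMaximumProfit (price : List Int) (profit : List Int) (out : Int) : Prop := out = getMaximumProfit_alt price profit
instance (price : List Int) (profit : List Int) (out : Int) : Decidable (Spec_getMaximumProfit price profit out) := by unfold Spec_getMaximumProfit; infer_instance

-- ===== CLAIM (what is proved, stated in full; the proofs are below) =====
def Claim_equal_getMaximumProfit : Prop := ∀ (price : List Int) (profit : List Int), Dom_getMaximumProfit price profit → Pre_getMaximumProfit price profit → Spec_getMaximumProfit price profit (getMaximumProfit price profit)

-- ===== LEMMAS AND PROOFS =====

-- Nat-level restatement of A (indices offset from the range starts, matching pyRange_one)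
def altA (p q : Nat → Int) (n : Nat) : Int :=
  (List.range n).foldl (fun mp i =>
    (List.range' i (n - i)).foldl (fun mp j =>
      if p i < p j then
        (List.range' j (n - j)).foldl (fun mp k =>
          if p j < p k then max (q i + q j + q k) mp else mp) mp
      else mp) mp) (-1)

def stepOpt (c : Nat → Prop) [DecidablePred c] (q : Nat → Int) (o : Option Int) (i : Nat) : Option Int :=
  match o with
  | none => if c i then some (q i) else none
  | some a => if c i ∧ q i > a then some (q i) else some a

-- Nat-level restatement of B
def altB (p q : Nat → Int) (n : Nat) : Int :=
  (List.range n).foldl (fun best j =>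
    match (List.range j).foldl (stepOpt (fun i => p i < p j) q) none with
    | none => best
    | some L =>
      match (List.range' (j + 1) (n - (j + 1))).foldl (stepOpt (fun k => p j < p k) q) none with
      | none => best
      | some R => max best (L + q j + R)) (-1)

-- candidate sums with middle j and right k, for left i
def KS (p q : Nat → Int) (n i j : Nat) : List Int :=
  (List.range' (j + 1) (n - (j + 1))).filterMap (fun k => if p j < p k then some (q i + q j + q k) else none)

def gA (p q : Nat → Int) (n i j : Nat) : List Int :=
  if i < j ∧ p i < p j then KS p q n i j else []

def omax (o : Option Int) (x : Int) : Option Int :=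
  some (match o with | none => x | some a => max a x)

-- foldl max basics
theorem mshift (l : List Int) : ∀ a b : Int, l.foldl max (max a b) = max a (l.foldl max b) := by
  induction l with
  | nil => intro a b; rfl
  | cons x xs ih =>
    intro a b
    simp only [List.foldl_cons]
    rw [max_assoc, ih]

theorem foldl_max_perm {l₁ l₂ : List Int} (h : l₁.Perm l₂) : ∀ a : Int, l₁.foldl max a = l₂.foldl max a := by
  induction h with
  | nil => intro a; rfl
  | cons x _ ih => intro a; simp only [List.foldl_cons]; exact ih _
  | swap x y l => intro a; simp only [List.foldl_cons]; rw [max_right_comm]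
  | trans _ _ ih₁ ih₂ => intro a; rw [ih₁, ih₂]

theorem foldl_max_flatMap {α : Type} (l : List α) (g : α → List Int) :
    ∀ a : Int, (l.flatMap g).foldl max a = l.foldl (fun acc x => (g x).foldl max acc) a := by
  induction l with
  | nil => intro a; rfl
  | cons x xs ih => intro a; simp only [List.flatMap_cons, List.foldl_append, List.foldl_cons]; exact ih _

theorem foldl_max_guard {α : Type} (l : List α) (c : α → Prop) [DecidablePred c] (f : α → Int) :
    ∀ a : Int, l.foldl (fun acc x => if c x then max (f x) acc else acc) a
      = (l.filterMap (fun x => if c x then some (f x) else none)).foldl max a := by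
  induction l with
  | nil => intro a; rfl
  | cons x xs ih =>
    intro a
    by_cases h : c x
    · simp only [List.filterMap_cons, List.foldl_cons, if_pos h]
      rw [ih, max_comm]
    · simp only [List.filterMap_cons, List.foldl_cons, if_neg h]
      rw [ih]

-- stepOpt fold is the omax fold over the filtered profits
theorem stepOpt_eq_omax (c : Nat → Prop) [DecidablePred c] (q : Nat → Int) (l : List Nat) :
    ∀ o : Option Int, l.foldl (stepOpt c q) o
      = (l.filterMap (fun i => if c i then some (q i) else none)).foldl omax o := by
  induction l with
  | nil => intro o; rfl
  | cons x xs ih =>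
    intro o
    by_cases h : c x
    · have hstep : stepOpt c q o x = omax o (q x) := by
        cases o with
        | none => simp [stepOpt, omax, h]
        | some a =>
          by_cases h2 : q x > a
          · simp [stepOpt, omax, h, h2, max_eq_right (le_of_lt h2)]
          · simp [stepOpt, omax, h, h2, max_eq_left (le_of_not_gt h2)]
      simp only [List.filterMap_cons, List.foldl_cons, if_pos h, hstep]
      exact ih _
    · have hstep : stepOpt c q o x = o := by
        cases o with
        | none => simp [stepOpt, h]
        | some a => simp [stepOpt, h]
      simp only [List.filterMap_cons, List.foldl_cons, if_neg h, hstep]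
      exact ih _

theorem omax_some (l : List Int) : ∀ a : Int, l.foldl omax (some a) = some (l.foldl max a) := by
  induction l with
  | nil => intro a; rfl
  | cons x xs ih => intro a; simp only [List.foldl_cons]; exact ih _

theorem omax_none (l : List Int) :
    l.foldl omax none = match l with | [] => none | x :: xs => some (xs.foldl max x) := by
  cases l with
  | nil => rfl
  | cons x xs => simp only [List.foldl_cons]; exact omax_some xs x

-- max over sums of a pair of nonempty lists
theorem core1 (rs : List Int) : ∀ (d acc r : Int),
    ((r :: rs).map (fun b => d + b)).foldl max acc = max acc (d + rs.foldl max r) := by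
  induction rs with
  | nil => intro d acc r; simp
  | cons b rs ih =>
    intro d acc r
    rw [List.map_cons, List.foldl_cons, ih d (max acc (d + r)) b, List.foldl_cons,
      mshift rs r b, ← max_add_add_left, ← max_assoc]

theorem core2 (ls : List Int) : ∀ (rs : List Int) (a r c acc : Int),
    ((a :: ls).flatMap (fun x => ((r :: rs).map (fun b => x + c + b)))).foldl max acc
      = max acc ((ls.foldl max a) + c + (rs.foldl max r)) := by
  induction ls with
  | nil =>
    intro rs a r c acc
    simp only [List.flatMap_cons, List.flatMap_nil, List.append_nil, List.foldl_nil]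
    exact core1 rs (a + c) acc r
  | cons a' ls ih =>
    intro rs a r c acc
    have hsplit : ((a :: a' :: ls).flatMap (fun x => ((r :: rs).map (fun b => x + c + b))))
        = ((r :: rs).map (fun b => a + c + b)) ++ ((a' :: ls).flatMap (fun x => ((r :: rs).map (fun b => x + c + b)))) := by
      simp [List.flatMap_cons]
    rw [hsplit, List.foldl_append, core1 rs (a + c) acc r, ih]
    rw [List.foldl_cons, mshift ls a a', ← max_add_add_right, ← max_add_add_right, ← max_assoc]

theorem summax (ls rs : List Int) (c acc : Int) :
    (ls.flatMap (fun a => rs.map (fun b => a + c + b))).foldl max acc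
      = match ls.foldl omax none, rs.foldl omax none with
        | some L, some R => max acc (L + c + R)
        | _, _ => acc := by
  cases ls with
  | nil => simp [omax_none]
  | cons a ls =>
    cases rs with
    | nil =>
      rw [omax_none]
      have hnil : (a :: ls).flatMap (fun a => (([] : List Int)).map (fun b => a + c + b)) = [] := by
        simp
      rw [hnil]
      rfl
    | cons r rs =>
      rw [omax_none, omax_none]
      exact core2 ls rs a r c acc

-- flatMap rearrangement lemmas
theorem flatMap_filterMap {α β γ : Type} (l : List α) (f : α → Option β) (h : β → List γ) :
    (l.filterMap f).flatMap h = l.flatMap (fun x => match f x with | none => [] | some a => h a) := by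
  induction l with
  | nil => rfl
  | cons x xs ih =>
    cases hx : f x <;> simp [hx, List.flatMap_cons, ih]

theorem flatMap_append_perm {α β : Type} (m : List α) (f h : α → List β) :
    (m.flatMap (fun b => f b ++ h b)).Perm (m.flatMap f ++ m.flatMap h) := by
  induction m with
  | nil => simp
  | cons b m ih =>
    simp only [List.flatMap_cons]
    refine (ih.append_left (f b ++ h b)).trans ?_
    rw [List.append_assoc, List.append_assoc]
    refine List.Perm.append_left (f b) ?_
    rw [← List.append_assoc, ← List.append_assoc]
    exact List.perm_append_comm.append_right _

theorem flatMap_swap_perm {α β γ : Type} (l₁ : List α) (l₂ : List β) (f : α → β → List γ) :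
    (l₁.flatMap fun a => l₂.flatMap fun b => f a b).Perm (l₂.flatMap fun b => l₁.flatMap fun a => f a b) := by
  induction l₁ with
  | nil => simp
  | cons a l₁ ih =>
    simp only [List.flatMap_cons]
    refine (ih.append_left _).trans ?_
    exact (flatMap_append_perm l₂ (fun b => f a b) (fun b => l₁.flatMap fun a => f a b)).symm


theorem range_split (i n : Nat) (h : i ≤ n) :
    List.range n = List.range' 0 i ++ List.range' i (n - i) := by
  rw [List.range_eq_range']
  have h2 := List.range'_append (s := 0) (m := i) (n := n - i) (step := 1)
  simp at h2
  rw [h2]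
  congr 1
  omega

-- the inner k-scan of A produces exactly KS
theorem kscan_eq_KS (p q : Nat → Int) (n i j : Nat) :
    (List.range' j (n - j)).filterMap (fun k => if p j < p k then some (q i + q j + q k) else none)
      = KS p q n i j := by
  unfold KS
  by_cases h : j < n
  · obtain ⟨m, hm⟩ : ∃ m, n - j = m + 1 := ⟨n - j - 1, by omega⟩
    have hm2 : n - (j + 1) = m := by omega
    rw [hm, hm2, List.range'_succ, List.filterMap_cons]
    simp
  · have h1 : n - j = 0 := by omega
    have h2 : n - (j + 1) = 0 := by omega
    rw [h1, h2, List.range'_zero, List.range'_zero]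

-- A's value as a fold over the flattened candidate list (i outer, then j)
theorem altA_eq (p q : Nat → Int) (n : Nat) :
    altA p q n = ((List.range n).flatMap (fun i => (List.range n).flatMap (gA p q n i))).foldl max (-1) := by
  unfold altA
  rw [foldl_max_flatMap]
  refine PySem.List.foldl_congr_mem _ _ _ _ ?_
  intro mp i hi
  rw [foldl_max_flatMap]
  have hrange : List.range n = List.range' 0 i ++ List.range' i (n - i) := by
    apply range_split
    simp at hi
    omega
  rw [hrange, List.foldl_append]
  have hpre : (List.range' 0 i).foldl (fun acc j => (gA p q n i j).foldl max acc) mp = mp := by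
    rw [← foldl_max_flatMap]
    have : (List.range' 0 i).flatMap (gA p q n i) = [] := by
      apply List.flatMap_eq_nil_iff.2
      intro j hj
      have : j < i := by
        have := (List.mem_range'_1.1 hj).2
        omega
      unfold gA
      rw [if_neg]
      rintro ⟨h1, -⟩
      omega
    rw [this]; rfl
  rw [hpre]
  refine PySem.List.foldl_congr_mem _ _ _ _ ?_
  intro acc j hj
  have hij : i ≤ j := (List.mem_range'_1.1 hj).1
  unfold gA
  by_cases h : p i < p j
  · have hlt : i < j := by
      rcases Nat.lt_or_ge i j with h' | h'
      · exact h'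
      · have : i = j := by omega
        subst this; exact absurd h (lt_irrefl _)
    rw [if_pos h, foldl_max_guard _ (fun k => p j < p k), kscan_eq_KS, if_pos ⟨hlt, h⟩]
  · rw [if_neg h, if_neg (show ¬(i < j ∧ p i < p j) by rintro ⟨-, h2⟩; exact h h2)]
    rfl

-- B's value as a fold over the flattened candidate list (j outer, then i)
theorem altB_eq (p q : Nat → Int) (n : Nat) :
    altB p q n = ((List.range n).flatMap (fun j => (List.range n).flatMap (fun i => gA p q n i j))).foldl max (-1) := by
  unfold altB
  rw [foldl_max_flatMap]
  refine PySem.List.foldl_congr_mem _ _ _ _ ?_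
  intro best j hj
  have hjn : j < n := by simpa using hj
  -- rewrite the inner list for this j
  have hlist : (List.range n).flatMap (fun i => gA p q n i j)
      = ((List.range' 0 j).filterMap (fun i => if p i < p j then some (q i) else none)).flatMap
          (fun L => (((List.range' (j + 1) (n - (j + 1))).filterMap (fun k => if p j < p k then some (q k) else none)).map
            (fun R => L + q j + R))) := by
    have hrange : List.range n = List.range' 0 j ++ List.range' j (n - j) :=
      range_split j n (by omega)
    rw [hrange, List.flatMap_append]
    have hpost : (List.range' j (n - j)).flatMap (fun i => gA p q n i j) = [] := by
      apply List.flatMap_eq_nil_iff.2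
      intro i hi
      have : j ≤ i := (List.mem_range'_1.1 hi).1
      unfold gA
      rw [if_neg]
      rintro ⟨h1, -⟩
      omega
    rw [hpost, List.append_nil, flatMap_filterMap]
    apply List.flatMap_congr
    intro i hi
    have hij : i < j := by
      have := (List.mem_range'_1.1 hi).2
      omega
    unfold gA KS
    by_cases h : p i < p j
    · simp only [if_pos h, if_pos (show i < j ∧ p i < p j from ⟨hij, h⟩)]
      rw [List.map_filterMap]
      apply List.filterMap_congr
      intro k hk
      by_cases h2 : p j < p k <;> simp [h2]
    · simp only [if_neg h, if_neg (show ¬(i < j ∧ p i < p j) from by rintro ⟨-, h2⟩; exact h h2)]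
  rw [hlist, summax]
  have hrj : List.range j = List.range' 0 j := List.range_eq_range'
  rw [hrj, stepOpt_eq_omax (fun i => p i < p j) q, stepOpt_eq_omax (fun k => p j < p k) q]
  cases hL : ((List.range' 0 j).filterMap (fun i => if p i < p j then some (q i) else none)).foldl omax none with
  | none => rfl
  | some L =>
    cases hR : ((List.range' (j + 1) (n - (j + 1))).filterMap (fun k => if p j < p k then some (q k) else none)).foldl omax none with
    | none => rfl
    | some R => rfl

theorem altA_eq_altB (p q : Nat → Int) (n : Nat) : altA p q n = altB p q n := by
  rw [altA_eq, altB_eq]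
  exact foldl_max_perm (flatMap_swap_perm (List.range n) (List.range n) (fun i j => gA p q n i j)) (-1)

-- bridging: pyRange over Nat bounds is a cast of range'
theorem pyRangeNat (a n : Nat) :
    PySem.List.pyRange (a : Int) (n : Int) 1 = List.map (fun (k : Nat) => (k : Int)) (List.range' a (n - a)) := by
  have ht : ((n : Int) - (a : Int)).toNat = n - a := by omega
  rw [PySem.List.pyRange_one, ht, List.range'_eq_map_range, List.map_map]
  apply List.map_congr_left
  intro k _
  simp [Function.comp]

theorem pyRangeNat0 (n : Nat) :
    PySem.List.pyRange 0 (n : Int) 1 = List.map (fun (k : Nat) => (k : Int)) (List.range n) := by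
  rw [show (0 : Int) = ((0 : Nat) : Int) from rfl, pyRangeNat, Nat.sub_zero, ← List.range_eq_range']

theorem bridgeA (price profit : List Int) :
    getMaximumProfit price profit
      = altA (fun i => price.getD i 0) (fun i => profit.getD i 0) price.length := by
  unfold getMaximumProfit altA
  rw [PySem.List.len_eq, pyRangeNat0, List.foldl_map]
  refine PySem.List.foldl_congr_mem _ _ _ _ ?_
  intro mp i _
  rw [pyRangeNat, List.foldl_map]
  refine PySem.List.foldl_congr_mem _ _ _ _ ?_
  intro mp j _
  simp only [PySem.List.pyGetD_natCast]
  by_cases h : price.getD i 0 < price.getD j 0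
  · rw [if_pos h, if_pos h, pyRangeNat, List.foldl_map]
    refine PySem.List.foldl_congr_mem _ _ _ _ ?_
    intro mp k _
    simp only [PySem.List.pyGetD_natCast]
  · rw [if_neg h, if_neg h]

theorem bridgeB (price profit : List Int) :
    getMaximumProfit_alt price profit
      = altB (fun i => price.getD i 0) (fun i => profit.getD i 0) price.length := by
  unfold getMaximumProfit_alt altB
  rw [PySem.List.len_eq, pyRangeNat0, List.foldl_map]
  refine PySem.List.foldl_congr_mem _ _ _ _ ?_
  intro best j _
  have hL : (PySem.List.pyRange 0 (j : Int) 1).foldl (fun left i =>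
        match left with
        | none => if PySem.List.pyGetD price i 0 < PySem.List.pyGetD price (j : Int) 0 then
                    some (PySem.List.pyGetD profit i 0) else none
        | some a => if PySem.List.pyGetD price i 0 < PySem.List.pyGetD price (j : Int) 0 ∧ PySem.List.pyGetD profit i 0 > a then
                    some (PySem.List.pyGetD profit i 0) else some a) none
      = (List.range j).foldl (stepOpt (fun i => price.getD i 0 < price.getD j 0) (fun i => profit.getD i 0)) none := by
    rw [pyRangeNat0, List.foldl_map]
    refine PySem.List.foldl_congr_mem _ _ _ _ ?_
    intro o i _
    cases o <;> simp [stepOpt, PySem.List.pyGetD_natCast]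
  rw [hL]
  cases (List.range j).foldl (stepOpt (fun i => price.getD i 0 < price.getD j 0) (fun i => profit.getD i 0)) none with
  | none => rfl
  | some L =>
    simp only
    have hj1 : ((j : Int) + 1) = (((j + 1 : Nat)) : Int) := by omega
    have hR : (PySem.List.pyRange ((j : Int) + 1) (price.length : Int) 1).foldl (fun right k =>
          match right with
          | none => if PySem.List.pyGetD price k 0 > PySem.List.pyGetD price (j : Int) 0 then
                      some (PySem.List.pyGetD profit k 0) else none
          | some a => if PySem.List.pyGetD price k 0 > PySem.List.pyGetD price (j : Int) 0 ∧ PySem.List.pyGetD profit k 0 > a then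
                      some (PySem.List.pyGetD profit k 0) else some a) none
        = (List.range' (j + 1) (price.length - (j + 1))).foldl (stepOpt (fun k => price.getD j 0 < price.getD k 0) (fun i => profit.getD i 0)) none := by
      rw [hj1, pyRangeNat, List.foldl_map]
      refine PySem.List.foldl_congr_mem _ _ _ _ ?_
      intro o k _
      cases o <;> simp [stepOpt, PySem.List.pyGetD_natCast]
    rw [hR]
    cases (List.range' (j + 1) (price.length - (j + 1))).foldl (stepOpt (fun k => price.getD j 0 < price.getD k 0) (fun i => profit.getD i 0)) none with
    | none => rfl
    | some R => simp only [PySem.List.pyGetD_natCast]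

-- ===== VERDICT (by name: the statement is the Claim_ definition above) =====
theorem getMaximumProfit_spec : Claim_equal_getMaximumProfit := by
  intro price profit _ _
  unfold Spec_getMaximumProfit
  rw [bridgeA, bridgeB, altA_eq_altB]
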